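-- pv_equiv track=rewrite | github.com/miketui/Loveme | epub-processing/process-chapter.py | break_title_into_lines
-- ===== SOURCE A (Python) =====
-- def break_title_into_lines(title_words, max_lines=6):
--     """Break title words into vertical lines (3-6 lines maximum)."""
--     if len(title_words) <= max_lines:
--         return title_words
--
--     # For longer titles, combine shorter words
--     lines = []
--     current_line = []
--     for word in title_words:
--         if len(word) <= 3 and len(current_line) == 1 and len(current_line[0]) <= 4:
--             current_line.append(word)
--         else:
--             if current_line:
--                 lines.append(' '.join(current_line))
--             current_line = [word]
--
--     if current_line:
--         lines.append(' '.join(current_line))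
--
--     return lines[:max_lines]
-- ===== SOURCE B (Python) =====
-- def break_title_into_lines(title_words, max_lines=6):
--     """Break title words into vertical lines (3-6 lines maximum)."""
--     if len(title_words) <= max_lines:
--         return title_words
--     # Index-based lookahead: merge a short word (<=4) with a following tiny word (<=3).
--     lines = []
--     i = 0
--     n = len(title_words)
--     while i < n:
--         if len(title_words[i]) <= 4 and i + 1 < n and len(title_words[i + 1]) <= 3:
--             lines.append(' '.join([title_words[i], title_words[i + 1]]))
--             i += 2
--         else:
--             lines.append(title_words[i])
--             i += 1
--     return lines[:max_lines]
-- ===== Notes on version B (the rewrite author's own statement) =====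
-- stated objective: alternative
-- what changed: Replaces A's current_line buffer (append/flush state machine) with a stateless index-based lookahead pass that merges a word of length <= 4 with a following word of length <= 3 and advances by 2, then slices to max_lines.
import Mathlib
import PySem

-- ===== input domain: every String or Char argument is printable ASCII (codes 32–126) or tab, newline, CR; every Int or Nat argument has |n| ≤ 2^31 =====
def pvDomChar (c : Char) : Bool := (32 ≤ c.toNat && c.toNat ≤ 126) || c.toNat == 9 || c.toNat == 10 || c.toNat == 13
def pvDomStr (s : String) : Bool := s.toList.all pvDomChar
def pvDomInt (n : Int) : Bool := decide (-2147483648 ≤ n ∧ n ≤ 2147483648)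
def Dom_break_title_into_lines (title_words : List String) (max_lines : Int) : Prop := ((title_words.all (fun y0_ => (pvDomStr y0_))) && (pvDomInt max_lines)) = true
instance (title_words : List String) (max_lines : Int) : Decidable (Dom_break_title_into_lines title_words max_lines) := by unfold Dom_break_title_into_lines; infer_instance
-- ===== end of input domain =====

-- B replaces A's current_line buffer with an index-based one-word lookahead pass (same cost, simpler state).

-- ===== PORT A =====
-- the for-loop of A: state is (lines, current_line)
def pvLoopA : List String → List String → List String → List String
  | [], lines, cur =>
      if cur ≠ [] then lines ++ [PySem.Str.join " " cur] else lines
  | w :: ws, lines, cur =>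
      if PySem.Str.len w ≤ 3 ∧ cur.length = 1 ∧ PySem.Str.len (cur.headD "") ≤ 4 then
        pvLoopA ws lines (cur ++ [w])
      else
        pvLoopA ws (if cur ≠ [] then lines ++ [PySem.Str.join " " cur] else lines) [w]

def break_title_into_lines (title_words : List String) (max_lines : Int) : List String :=
  if (title_words.length : Int) ≤ max_lines then title_words
  else PySem.List.slice (pvLoopA title_words [] []) none (some max_lines)

-- ===== PORT B =====
-- B's while-loop with lookahead, as structural recursion on the word list
def pvEmitB : List String → List String
  | [] => []
  | [w] => [w]
  | w :: w2 :: rest =>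
      if PySem.Str.len w ≤ 4 ∧ PySem.Str.len w2 ≤ 3 then
        PySem.Str.join " " [w, w2] :: pvEmitB rest
      else
        w :: pvEmitB (w2 :: rest)

def break_title_into_lines_alt (title_words : List String) (max_lines : Int) : List String :=
  if (title_words.length : Int) ≤ max_lines then title_words
  else PySem.List.slice (pvEmitB title_words) none (some max_lines)

-- ===== PRECONDITION & SPEC =====
def Spec_break_title_into_lines (title_words : List String) (max_lines : Int) (out : List String) : Prop := out = break_title_into_lines_alt title_words max_lines
instance (title_words : List String) (max_lines : Int) (out : List String) : Decidable (Spec_break_title_into_lines title_words max_lines out) := by unfold Spec_break_title_into_lines; infer_instance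

-- ===== CLAIM (what is proved, stated in full; the proofs are below) =====
def Claim_equal_break_title_into_lines : Prop := ∀ (title_words : List String) (max_lines : Int), Dom_break_title_into_lines title_words max_lines → Spec_break_title_into_lines title_words max_lines (break_title_into_lines title_words max_lines)

-- ===== LEMMAS AND PROOFS =====

-- a one-word buffer behaves exactly like B's lookahead on the remaining words
theorem pvLoopA_one : ∀ (n : Nat) (ws : List String), ws.length ≤ n →
    ∀ (lines : List String) (w : String),
      pvLoopA ws lines [w] = lines ++ pvEmitB (w :: ws) := by
  intro n
  induction n with
  | zero =>
      intro ws h lines w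
      have : ws = [] := List.eq_nil_of_length_eq_zero (Nat.le_zero.mp h)
      subst this
      simp [pvLoopA, pvEmitB, PySem.Str.join]
  | succ n ih =>
      intro ws h lines w
      cases ws with
      | nil => simp [pvLoopA, pvEmitB, PySem.Str.join]
      | cons w2 rest =>
        by_cases hc : w.length ≤ 4 ∧ w2.length ≤ 3
        · -- merge: cur becomes [w, w2]
          have hstep : pvLoopA (w2 :: rest) lines [w] = pvLoopA rest lines [w, w2] := by
            simp [pvLoopA, PySem.Str.len, hc.1, hc.2]
          rw [hstep]
          cases rest with
          | nil =>
              simp [pvLoopA, pvEmitB, PySem.Str.len, hc.1, hc.2]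
          | cons w3 rest' =>
              have hstep2 : pvLoopA (w3 :: rest') lines [w, w2]
                  = pvLoopA rest' (lines ++ [PySem.Str.join " " [w, w2]]) [w3] := by
                simp [pvLoopA]
              rw [hstep2, ih rest' (by simp at h ⊢; omega)]
              simp [pvEmitB, PySem.Str.len, hc.1, hc.2]
        · -- no merge: flush [w], start [w2]
          have hstep : pvLoopA (w2 :: rest) lines [w]
              = pvLoopA rest (lines ++ [PySem.Str.join " " [w]]) [w2] := by
            by_cases h2 : w2.length ≤ 3
            · have h4 : ¬ w.length ≤ 4 := fun h4 => hc ⟨h4, h2⟩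
              simp [pvLoopA, PySem.Str.len, h2, h4]
            · simp [pvLoopA, PySem.Str.len, h2]
          rw [hstep, ih rest (by simp at h ⊢; omega)]
          have hj : PySem.Str.join " " [w] = w := by
            simp [PySem.Str.join]
          rw [hj]
          simp [pvEmitB, PySem.Str.len, hc]

theorem pvLoopA_eq_emitB (ws : List String) : pvLoopA ws [] [] = pvEmitB ws := by
  cases ws with
  | nil => simp [pvLoopA, pvEmitB]
  | cons w rest =>
      have hstep : pvLoopA (w :: rest) [] [] = pvLoopA rest [] [w] := by
        simp [pvLoopA]
      rw [hstep, pvLoopA_one rest.length rest (le_refl _)]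
      simp

-- ===== VERDICT (by name: the statement is the Claim_ definition above) =====
theorem break_title_into_lines_spec : Claim_equal_break_title_into_lines := by
  intro tw ml _
  unfold Spec_break_title_into_lines break_title_into_lines break_title_into_lines_alt
  rw [pvLoopA_eq_emitB]
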